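-- pv_equiv track=rewrite | github.com/jmx01/initial | greedy_solution.py | alpha_effect
-- ===== SOURCE A (Python) =====
-- def alpha_effect(table, al):
--     for i in range(len(table)):
--         for j in range(len(table[i][1])):
--             if j not in [0, len(table[i][1]) - 1]:
--                 if table[i][1][j][1] == 1:
--                     table[i][1][j][0] += 2 * al
--                 else:
--                     table[i][1][j][0] -= 2 * al
--             else:
--                 if table[i][1][j][1] == 1:
--                     table[i][1][j][0] += al
--                 else:
--                     table[i][1][j][0] -= al
--
--     for i in range(len(table)):
--         j = 0
--         while j < len(table[i][1]) - 1:
--             if table[i][1][j][0] < 0: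
--                 if j != 0:
--                     table[i][1][j][0] = table[i][1][j][0] + table[i][1][j + 1][0] + table[i][1][j - 1][0]
--                     del table[i][1][j + 1], table[i][1][j - 1]
--                     j -= 1
--                 else:
--                     table[i][1][j][0] = table[i][1][j][0] + table[i][1][j + 1][0]
--                     del table[i][1][j + 1]
--             else:
--                 j += 1
--
--     return table
-- ===== SOURCE B (Python) =====
-- def alpha_effect(table, al):
--     # Note: the original mutates `table` in place; this version builds a new list
--     # (equivalence is about the return value).
--     result = []
--     for key, rows in table:
--         n = len(rows)
--         adj = []
--         for j, row in enumerate(rows):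
--             d = al if j == 0 or j == n - 1 else 2 * al
--             adj.append([row[0] + (d if row[1] == 1 else -d)] + row[1:])
--         res = []
--         k = 0
--         while k < n:
--             cur = adj[k]
--             k += 1
--             while cur[0] < 0 and k < n:
--                 v = cur[0] + adj[k][0]
--                 k += 1
--                 if res:
--                     v += res.pop()[0]
--                 cur = [v] + cur[1:]
--             res.append(cur)
--         result.append((key, res))
--     return result
-- ===== Notes on version B (the rewrite author's own statement) =====
-- stated objective: alternative
-- what changed: Replaces the in-place index-walking merge with list deletions and cursor backtracking (del rows[j+1], rows[j-1], j -= 1) by a single left-to-right pass per row that keeps processed entries on a stack and merges a negative entry with the next input element and the popped stack top; the adjustment pass is fused into the same traversal and a fresh result list is built (A mutates table in place, B does not).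
import Mathlib
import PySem

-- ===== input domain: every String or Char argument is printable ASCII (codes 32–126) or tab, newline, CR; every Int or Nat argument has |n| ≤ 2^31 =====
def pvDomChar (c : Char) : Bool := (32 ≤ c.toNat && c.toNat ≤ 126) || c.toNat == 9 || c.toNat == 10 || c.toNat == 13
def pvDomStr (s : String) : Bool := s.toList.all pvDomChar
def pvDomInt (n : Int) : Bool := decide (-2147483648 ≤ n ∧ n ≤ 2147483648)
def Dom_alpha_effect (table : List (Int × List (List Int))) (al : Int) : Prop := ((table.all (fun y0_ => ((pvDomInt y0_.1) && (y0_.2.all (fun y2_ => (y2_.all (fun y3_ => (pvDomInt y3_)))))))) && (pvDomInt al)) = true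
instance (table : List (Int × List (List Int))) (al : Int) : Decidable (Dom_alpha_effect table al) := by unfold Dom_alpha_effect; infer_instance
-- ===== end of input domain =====

-- B replaces A's in-place neighbour-merging with index deletions and cursor
-- backtracking by a single left-to-right stack pass per row; equivalence is about
-- the RETURN value (the Python A also mutates `table` in place, B does not).

-- ===== PORT A =====
-- row[0] read / write and row[1] read (rows admitted by Pre_ have length ≥ 2, where
-- these total renderings coincide with Python's raising indexing)
def pvGet0A (rows : List (List Int)) (j : Nat) : Int := (rows.getD j []).headD 0

def pvSet0A (v : Int) (row : List Int) : List Int := v :: row.drop 1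

-- first pass: `for j in range(len(rows)): rows[j][0] ±= al / 2*al` (element j only)
def pvRowAdjA (al : Int) (n : Nat) (j : Nat) (row : List Int) : List Int :=
  if ¬ (j = 0 ∨ j = n - 1) then
    if (PySem.List.pyGet? row 1).getD 0 = 1 then pvSet0A (row.headD 0 + 2 * al) row
    else pvSet0A (row.headD 0 - 2 * al) row
  else
    if (PySem.List.pyGet? row 1).getD 0 = 1 then pvSet0A (row.headD 0 + al) row
    else pvSet0A (row.headD 0 - al) row

def pvPhase1A (al : Int) (rows : List (List Int)) : List (List Int) :=
  rows.mapIdx (fun j row => pvRowAdjA al rows.length j row)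

-- second pass: the `while j < len(rows) - 1` loop with in-place deletions
def pvMergeA (rows : List (List Int)) (j : Nat) : List (List Int) :=
  if h : j + 1 < rows.length then
    if pvGet0A rows j < 0 then
      if hj : j ≠ 0 then
        let newv := pvGet0A rows j + pvGet0A rows (j + 1) + pvGet0A rows (j - 1)
        pvMergeA (((rows.modify j (pvSet0A newv)).eraseIdx (j + 1)).eraseIdx (j - 1)) (j - 1)
      else
        let newv := pvGet0A rows j + pvGet0A rows (j + 1)
        pvMergeA ((rows.modify j (pvSet0A newv)).eraseIdx (j + 1)) j
    else
      pvMergeA rows (j + 1)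
  else rows
termination_by 2 * rows.length - j
decreasing_by
  · simp only [List.length_eraseIdx, List.length_modify]
    split <;> split <;> omega
  · simp only [List.length_eraseIdx, List.length_modify]
    split <;> omega
  · omega

def alpha_effect (table : List (Int × List (List Int))) (al : Int) : List (Int × List (List Int)) :=
  let t1 := table.map (fun p => (p.1, pvPhase1A al p.2))
  t1.map (fun p => (p.1, pvMergeA p.2 0))

-- ===== PORT B =====
-- adjusted value of row number j (of n): `[row[0] ± d] + row[1:]`
def pvAdjRowB (al : Int) (n : Nat) (j : Nat) (row : List Int) : List Int :=
  let d : Int := if j = 0 ∨ j = n - 1 then al else 2 * al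
  (row.headD 0 + (if (PySem.List.pyGet? row 1).getD 0 = 1 then d else -d)) :: row.drop 1

-- the `for j, row in enumerate(rows)` accumulation building `adj`
def pvAdjB (al : Int) (n : Nat) (j : Nat) : List (List Int) → List (List Int)
  | [] => []
  | row :: rest => pvAdjRowB al n j row :: pvAdjB al n (j + 1) rest

-- the stack pass: `res` is the stack (head = top), `cur` the element in hand,
-- `rest` the unconsumed tail of `adj`
def pvMergeB (res : List (List Int)) (cur : List Int) (rest : List (List Int)) : List (List Int) :=
  match rest with
  | [] => (cur :: res).reverse
  | nxt :: rest' =>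
    if cur.headD 0 < 0 then
      match res with
      | [] => pvMergeB [] ((cur.headD 0 + nxt.headD 0) :: cur.drop 1) rest'
      | top :: res'' => pvMergeB res'' ((cur.headD 0 + nxt.headD 0 + top.headD 0) :: cur.drop 1) rest'
    else
      pvMergeB (cur :: res) nxt rest'
termination_by res.length + 2 * rest.length
decreasing_by all_goals simp <;> omega

def pvRowB (al : Int) (rows : List (List Int)) : List (List Int) :=
  match pvAdjB al rows.length 0 rows with
  | [] => []
  | c :: rest => pvMergeB [] c rest

def alpha_effect_alt (table : List (Int × List (List Int))) (al : Int) : List (Int × List (List Int)) :=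
  table.map (fun p => (p.1, pvRowB al p.2))

-- ===== PRECONDITION & SPEC =====
-- Pre_ excludes exactly the inputs on which Python A raises IndexError: a row with
-- fewer than two entries (A reads row[1] and row[0]).
def Pre_alpha_effect (table : List (Int × List (List Int))) (al : Int) : Prop :=
  ∀ p ∈ table, ∀ row ∈ p.2, 2 ≤ row.length

instance (table : List (Int × List (List Int))) (al : Int) : Decidable (Pre_alpha_effect table al) := by
  unfold Pre_alpha_effect; infer_instance

def pvWitness_alpha_effect : (List (Int × List (List Int))) × Int :=
  ([(1, [[3, 1], [-2, 0], [5, 1]]), (2, [[0, 0], [4, 1]])], 2)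

def Spec_alpha_effect (table : List (Int × List (List Int))) (al : Int) (out : List (Int × List (List Int))) : Prop := out = alpha_effect_alt table al
instance (table : List (Int × List (List Int))) (al : Int) (out : List (Int × List (List Int))) : Decidable (Spec_alpha_effect table al out) := by unfold Spec_alpha_effect; infer_instance

-- ===== CLAIM (what is proved, stated in full; the proofs are below) =====
def Claim_equal_alpha_effect : Prop := ∀ (table : List (Int × List (List Int))) (al : Int), Dom_alpha_effect table al → Pre_alpha_effect table al → Spec_alpha_effect table al (alpha_effect table al)

-- ===== LEMMAS AND PROOFS =====

theorem pv_modify_append_len {α : Type} (l1 : List α) (a : α) (l2 : List α) (f : α → α) :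
    (l1 ++ a :: l2).modify l1.length f = l1 ++ f a :: l2 := by
  induction l1 with
  | nil => rfl
  | cons x xs ih => simpa [List.modify_succ_cons] using ih

theorem pv_eraseIdx_append_len {α : Type} (l1 : List α) (a : α) (l2 : List α) :
    (l1 ++ a :: l2).eraseIdx l1.length = l1 ++ l2 := by
  induction l1 with
  | nil => rfl
  | cons x xs ih => simpa using ih

-- the two adjustment passes compute the same list
theorem pv_adj_eq (al : Int) (n : Nat) :
    ∀ (rows : List (List Int)) (j : Nat),
      pvAdjB al n j rows = rows.mapIdx (fun i row => pvRowAdjA al n (j + i) row) := by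
  intro rows
  induction rows with
  | nil => intro j; rfl
  | cons r rs ih =>
    intro j
    have hrow : pvAdjRowB al n j r = pvRowAdjA al n j r := by
      unfold pvAdjRowB pvRowAdjA pvSet0A
      by_cases h : j = 0 ∨ j = n - 1 <;> by_cases hf : (PySem.List.pyGet? r 1).getD 0 = 1 <;>
        simp [h, hf, sub_eq_add_neg]
    have hfun : (fun i (row : List Int) => pvRowAdjA al n (j + 1 + i) row)
        = (fun i (row : List Int) => pvRowAdjA al n (j + (i + 1)) row) := by
      funext i row; congr 1; omega
    simp only [pvAdjB, List.mapIdx_cons, ih (j + 1), hrow, hfun, Nat.add_zero]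

-- pvGet0A reads the element after a prefix
theorem pv_get0_append (l1 : List (List Int)) (a : List Int) (l2 : List (List Int)) :
    pvGet0A (l1 ++ a :: l2) l1.length = a.headD 0 := by
  induction l1 with
  | nil => rfl
  | cons x xs ih => simpa [pvGet0A] using ih

-- the index-walking merge loop of A equals the stack pass of B:
-- A's list is  res.reverse ++ cur :: rest  with the cursor j sitting on cur
theorem pv_merge_eq :
    ∀ (res : List (List Int)) (cur : List Int) (rest : List (List Int)),
      pvMergeA (res.reverse ++ cur :: rest) res.length = pvMergeB res cur rest := by
  intro res cur rest
  fun_induction pvMergeB res cur rest with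
  | case1 res cur =>
    rw [pvMergeA]
    rw [dif_neg (by simp)]
    simp
  | case2 cur nxt rest' hneg ih =>
    -- j = 0 merge: the stack is empty
    rw [pvMergeA]
    simp only [List.reverse_nil, List.nil_append, List.length_nil] at ih ⊢
    rw [dif_pos (by simp)]
    rw [if_pos (show pvGet0A (cur :: nxt :: rest') 0 < 0 from hneg)]
    rw [dif_neg (by simp)]
    have h1 : pvGet0A (cur :: nxt :: rest') (0 + 1) = nxt.headD 0 := by
      simpa using pv_get0_append [cur] nxt rest'
    have h0 : pvGet0A (cur :: nxt :: rest') 0 = cur.headD 0 := rfl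
    rw [h0, h1]
    simpa [pvSet0A, List.modify_zero_cons, List.eraseIdx] using ih
  | case3 cur nxt rest' hneg top res'' ih =>
    -- j ≥ 1 merge: the stack is top :: res''
    have hL : (top :: res'').reverse ++ cur :: nxt :: rest'
        = res''.reverse ++ top :: cur :: nxt :: rest' := by simp
    rw [hL, pvMergeA]
    rw [show (top :: res'').length = res''.length + 1 from rfl]
    have hlenrev : (res''.reverse).length = res''.length := by simp
    rw [dif_pos (by simp; omega)]
    have hcur : pvGet0A (res''.reverse ++ top :: cur :: nxt :: rest') (res''.length + 1)
        = cur.headD 0 := by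
      simpa [List.append_assoc, hlenrev] using
        pv_get0_append (res''.reverse ++ [top]) cur (nxt :: rest')
    have hnxt : pvGet0A (res''.reverse ++ top :: cur :: nxt :: rest') (res''.length + 1 + 1)
        = nxt.headD 0 := by
      simpa [List.append_assoc, hlenrev, Nat.add_assoc] using
        pv_get0_append (res''.reverse ++ [top, cur]) nxt rest'
    have htop : pvGet0A (res''.reverse ++ top :: cur :: nxt :: rest') (res''.length + 1 - 1)
        = top.headD 0 := by
      simpa [hlenrev] using pv_get0_append res''.reverse top (cur :: nxt :: rest')
    rw [if_pos (by rw [hcur]; exact hneg)]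
    rw [dif_pos (by omega)]
    rw [hcur, hnxt, htop]
    have e1 : (res''.reverse ++ top :: cur :: nxt :: rest').modify (res''.length + 1)
        (pvSet0A (cur.headD 0 + nxt.headD 0 + top.headD 0))
        = res''.reverse ++ top :: pvSet0A (cur.headD 0 + nxt.headD 0 + top.headD 0) cur :: nxt :: rest' := by
      simpa [List.append_assoc, hlenrev] using
        pv_modify_append_len (res''.reverse ++ [top]) cur (nxt :: rest')
          (pvSet0A (cur.headD 0 + nxt.headD 0 + top.headD 0))
    simp only [e1]
    have e2 : (res''.reverse ++ top :: pvSet0A (cur.headD 0 + nxt.headD 0 + top.headD 0) cur :: nxt :: rest').eraseIdx (res''.length + 1 + 1)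
        = res''.reverse ++ top :: pvSet0A (cur.headD 0 + nxt.headD 0 + top.headD 0) cur :: rest' := by
      simpa [List.append_assoc, hlenrev, Nat.add_assoc] using
        pv_eraseIdx_append_len (res''.reverse ++ [top, pvSet0A (cur.headD 0 + nxt.headD 0 + top.headD 0) cur]) nxt rest'
    rw [e2]
    have e3 : (res''.reverse ++ top :: pvSet0A (cur.headD 0 + nxt.headD 0 + top.headD 0) cur :: rest').eraseIdx (res''.length + 1 - 1)
        = res''.reverse ++ pvSet0A (cur.headD 0 + nxt.headD 0 + top.headD 0) cur :: rest' := by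
      simpa [hlenrev] using
        pv_eraseIdx_append_len res''.reverse top (pvSet0A (cur.headD 0 + nxt.headD 0 + top.headD 0) cur :: rest')
    rw [e3]
    simpa [pvSet0A] using ih
  | case4 res cur nxt rest' hneg ih =>
    -- cur ≥ 0: advance the cursor
    rw [pvMergeA]
    rw [dif_pos (by simp)]
    have hcur : pvGet0A (res.reverse ++ cur :: nxt :: rest') res.length = cur.headD 0 := by
      simpa using pv_get0_append res.reverse cur (nxt :: rest')
    rw [if_neg (by rw [hcur]; exact hneg)]
    have hflip : res.reverse ++ cur :: nxt :: rest' = (cur :: res).reverse ++ nxt :: rest' := by simp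
    rw [hflip, show res.length + 1 = (cur :: res).length from rfl]
    exact ih

theorem pv_row_eq (al : Int) (rows : List (List Int)) :
    (pvMergeA (pvPhase1A al rows) 0) = pvRowB al rows := by
  unfold pvRowB
  rw [pv_adj_eq al rows.length rows 0]
  have hadj : (rows.mapIdx fun i row => pvRowAdjA al rows.length (0 + i) row) = pvPhase1A al rows := by
    unfold pvPhase1A
    congr 1
    funext i row
    rw [Nat.zero_add]
  rw [hadj]
  cases hx : pvPhase1A al rows with
  | nil => rw [pvMergeA]; simp
  | cons c rest => simpa using pv_merge_eq [] c rest

-- ===== VERDICT (by name: the statement is the Claim_ definition above) =====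
theorem alpha_effect_spec : Claim_equal_alpha_effect := by
  intro table al _ _
  unfold Spec_alpha_effect alpha_effect alpha_effect_alt
  simp only [List.map_map]
  exact List.map_congr_left (fun p _ => by simp [Function.comp, pv_row_eq])
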